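-- pv_equiv track=rewrite | github.com/danielthepope/tfl-tree | tfltree/raspberrypi/subtitle.py | _create_srt_fragment
-- ===== SOURCE A (Python) =====
-- CHARACTERS_PER_LINE = 32
--
-- MAX_LINES = 2
--
-- def _create_srt_fragment(index, start, duration, text):
--     start_timestamp = _convert_ms_to_timestamp(start)
--     end_timestamp = _convert_ms_to_timestamp(start + duration)
--     words = text.split(' ')
--     srt_lines = ['']
--     char_count = 0
--     for word in words:
--         if char_count + len(word) > CHARACTERS_PER_LINE and len(srt_lines) < MAX_LINES:
--             srt_lines.append('')
--             char_count = 0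
--         srt_lines[-1] += word + ' '
--         char_count += len(word) + 1
--     srt_text = ''
--     for line in srt_lines:
--         srt_text += line.strip() + '\n'
--     return '%s\n%s --> %s\n%s\n' % (index, start_timestamp, end_timestamp, srt_text)
--
-- MILLIS_IN_HOUR = 3600000
--
-- MILLIS_IN_MINUTE = 60000
--
-- MILLIS_IN_SECOND = 1000
--
-- def _convert_ms_to_timestamp(millis):
--     hours = int(millis / MILLIS_IN_HOUR)
--     minutes = int((millis % MILLIS_IN_HOUR) / MILLIS_IN_MINUTE)
--     seconds = int((millis % MILLIS_IN_MINUTE) / MILLIS_IN_SECOND)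
--     ms = millis % MILLIS_IN_SECOND
--     return '%02d:%02d:%02d,%03d' % (hours, minutes, seconds, ms)
-- ===== SOURCE B (Python) =====
-- CHARACTERS_PER_LINE = 32
--
-- MAX_LINES = 2
--
-- MILLIS_IN_HOUR = 3600000
--
-- MILLIS_IN_MINUTE = 60000
--
-- MILLIS_IN_SECOND = 1000
--
--
-- def _convert_ms_to_timestamp(millis):
--     hours = int(millis / MILLIS_IN_HOUR)
--     minutes = int((millis % MILLIS_IN_HOUR) / MILLIS_IN_MINUTE)
--     seconds = int((millis % MILLIS_IN_MINUTE) / MILLIS_IN_SECOND)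
--     ms = millis % MILLIS_IN_SECOND
--     return '%02d:%02d:%02d,%03d' % (hours, minutes, seconds, ms)
--
--
-- def _create_srt_fragment(index, start, duration, text):
--     words = text.split(' ')
--     split_at = None
--     count = 0
--     for i, word in enumerate(words):
--         if count + len(word) > CHARACTERS_PER_LINE:
--             split_at = i
--             break
--         count += len(word) + 1
--     if split_at is None:
--         lines = [' '.join(words)]
--     else:
--         lines = [' '.join(words[:split_at]), ' '.join(words[split_at:])]
--     srt_text = ''.join(line.strip() + '\n' for line in lines)
--     return '%s\n%s --> %s\n%s\n' % (index, _convert_ms_to_timestamp(start),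
--                                     _convert_ms_to_timestamp(start + duration), srt_text)
-- ===== Notes on version B (the rewrite author's own statement) =====
-- stated objective: alternative
-- what changed: B replaces A's stateful line-accumulating loop (list of lines, running char count, append-to-last-line) by a one-pass search for the split index followed by slice-and-join of the word list; the timestamp helper is reused unchanged.
import Mathlib
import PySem

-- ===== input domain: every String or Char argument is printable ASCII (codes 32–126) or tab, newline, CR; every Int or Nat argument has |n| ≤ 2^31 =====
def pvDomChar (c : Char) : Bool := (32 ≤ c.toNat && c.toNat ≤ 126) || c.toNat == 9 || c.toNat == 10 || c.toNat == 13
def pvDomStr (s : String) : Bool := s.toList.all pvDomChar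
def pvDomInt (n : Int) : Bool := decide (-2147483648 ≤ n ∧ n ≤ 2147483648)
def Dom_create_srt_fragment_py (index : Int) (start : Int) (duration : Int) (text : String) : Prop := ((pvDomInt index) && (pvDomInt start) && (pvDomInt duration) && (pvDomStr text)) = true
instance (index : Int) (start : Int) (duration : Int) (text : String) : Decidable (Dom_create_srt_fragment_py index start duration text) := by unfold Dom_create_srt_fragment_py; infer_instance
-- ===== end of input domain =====

-- B builds the subtitle lines by first locating the split index in one scan and then
-- slicing + joining the word list, instead of A's stateful line-accumulating loop
-- (objective: alternative decomposition, same cost); the timestamp helper is reused unchanged.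

-- ===== PORT A =====

-- _convert_ms_to_timestamp (identical helper in A and B); int(x / d) is truncating
-- division, exact here on the stated |int| ≤ 2^31 domain (quotients are far below 2^53)
def pvTimestamp (millis : Int) : String :=
  let hours := PySem.Int.truncdiv millis 3600000
  let minutes := PySem.Int.truncdiv (PySem.Int.mod millis 3600000) 60000
  let seconds := PySem.Int.truncdiv (PySem.Int.mod millis 60000) 1000
  let ms := PySem.Int.mod millis 1000
  PySem.Str.zfill (PySem.Int.toStr hours) 2 ++ ":" ++ PySem.Str.zfill (PySem.Int.toStr minutes) 2
    ++ ":" ++ PySem.Str.zfill (PySem.Int.toStr seconds) 2 ++ "," ++ PySem.Str.zfill (PySem.Int.toStr ms) 3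

-- loop body of A: optional append of a fresh line, then `srt_lines[-1] += word + ' '`
def pvStepA (st : List String × Int) (word : String) : List String × Int :=
  let st' := if st.2 + PySem.Str.len word > 32 ∧ st.1.length < 2 then (st.1 ++ [""], (0 : Int)) else st
  (st'.1.dropLast ++ [st'.1.getLastD "" ++ word ++ " "], st'.2 + PySem.Str.len word + 1)

def create_srt_fragment_py (index : Int) (start : Int) (duration : Int) (text : String) : String :=
  let start_timestamp := pvTimestamp start
  let end_timestamp := pvTimestamp (start + duration)
  let words := (PySem.Str.split? text " ").getD []      -- sep = " " ≠ "": split? is always `some`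
  let srt_lines := (words.foldl pvStepA ([""], 0)).1
  let srt_text := srt_lines.foldl (fun acc line => acc ++ PySem.Str.strip line ++ "\n") ""
  PySem.Int.toStr index ++ "\n" ++ start_timestamp ++ " --> " ++ end_timestamp ++ "\n" ++ srt_text ++ "\n"

-- ===== PORT B =====

-- B's enumerate loop with break: first index whose word overflows the budget, or none
def pvFindSplit (count : Int) (words : List String) : Option Nat :=
  match words with
  | [] => none
  | w :: ws =>
      if count + PySem.Str.len w > 32 then some 0
      else (pvFindSplit (count + PySem.Str.len w + 1) ws).map (· + 1)

def create_srt_fragment_py_alt (index : Int) (start : Int) (duration : Int) (text : String) : String :=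
  let words := (PySem.Str.split? text " ").getD []
  let lines :=
    match pvFindSplit 0 words with
    | none => [PySem.Str.join " " words]
    | some i => [PySem.Str.join " " (words.take i), PySem.Str.join " " (words.drop i)]
  let srt_text := PySem.Str.join "" (lines.map (fun line => PySem.Str.strip line ++ "\n"))
  PySem.Int.toStr index ++ "\n" ++ pvTimestamp start ++ " --> " ++ pvTimestamp (start + duration)
    ++ "\n" ++ srt_text ++ "\n"

-- ===== PRECONDITION & SPEC =====
def Spec_create_srt_fragment_py (index : Int) (start : Int) (duration : Int) (text : String) (out : String) : Prop := out = create_srt_fragment_py_alt index start duration text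
instance (index : Int) (start : Int) (duration : Int) (text : String) (out : String) : Decidable (Spec_create_srt_fragment_py index start duration text out) := by unfold Spec_create_srt_fragment_py; infer_instance

-- ===== CLAIM (what is proved, stated in full; the proofs are below) =====
def Claim_equal_create_srt_fragment_py : Prop := ∀ (index : Int) (start : Int) (duration : Int) (text : String), Dom_create_srt_fragment_py index start duration text → Spec_create_srt_fragment_py index start duration text (create_srt_fragment_py index start duration text)

-- ===== LEMMAS AND PROOFS =====

-- words joined the way A's loop accumulates them: every word followed by one space
def pvJoinT : List String → String
  | [] => ""
  | w :: ws => w ++ " " ++ pvJoinT ws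

def pvWeight : List String → Int
  | [] => 0
  | w :: ws => PySem.Str.len w + 1 + pvWeight ws

-- after the split has happened (two lines present) A only ever appends to the last line
theorem pvStepA_two (ws : List String) : ∀ (a b : String) (c : Int),
    ws.foldl pvStepA ([a, b], c) = ([a, b ++ pvJoinT ws], c + pvWeight ws) := by
  induction ws with
  | nil => intro a b c; simp [pvJoinT, pvWeight]
  | cons w ws ih =>
      intro a b c
      simp only [List.foldl_cons, pvStepA]
      norm_num
      rw [ih]
      simp [pvJoinT, pvWeight, String.append_assoc]
      ring

-- the one-line phase of A, characterised by B's split search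
theorem pvStepA_one (ws : List String) : ∀ (a : String) (c : Int),
    (ws.foldl pvStepA ([a], c)).1 =
      match pvFindSplit c ws with
      | none => [a ++ pvJoinT ws]
      | some i => [a ++ pvJoinT (ws.take i), pvJoinT (ws.drop i)] := by
  induction ws with
  | nil => intro a c; simp [pvFindSplit, pvJoinT]
  | cons w ws ih =>
      intro a c
      by_cases h : c + PySem.Str.len w > 32
      · simp only [List.foldl_cons, pvStepA, pvFindSplit, h, if_pos, List.length_cons]
        norm_num
        rw [pvStepA_two]
        simp [pvJoinT]
      · simp only [List.foldl_cons, pvStepA, pvFindSplit, h, if_neg, not_false_iff]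
        norm_num [h]
        rw [ih]
        cases hf : pvFindSplit (c + PySem.Str.len w + 1) ws with
        | none =>
            simp only [PySem.Str.len_eq, String.length_toList] at hf
            rw [hf]; simp [pvJoinT, String.append_assoc]
        | some i =>
            simp only [PySem.Str.len_eq, String.length_toList] at hf
            rw [hf]; simp [pvJoinT, String.append_assoc]

theorem pvRstrip_space (l : List Char) : PySem.Chars.rstrip (l ++ [' ']) = PySem.Chars.rstrip l := by
  simp [PySem.Chars.rstrip, show PySem.Chars.isspace ' ' = true from by decide]

theorem pvStrip_space (s : String) : PySem.Str.strip (s ++ " ") = PySem.Str.strip s := by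
  apply String.toList_inj.mp
  simp only [PySem.Str.strip, String.toList_ofList, String.toList_append, PySem.Chars.strip,
    PySem.Chars.lstrip, List.dropWhile_append]
  by_cases h : (List.dropWhile PySem.Chars.isspace s.toList).isEmpty
  · simp [show PySem.Chars.isspace ' ' = true from by decide,
      List.isEmpty_iff.mp h, PySem.Chars.rstrip]
  · simpa [h] using pvRstrip_space (List.dropWhile PySem.Chars.isspace s.toList)

theorem pvJoin_cons_cons (sep w v : String) (ws : List String) :
    PySem.Str.join sep (w :: v :: ws) = w ++ sep ++ PySem.Str.join sep (v :: ws) := by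
  apply String.toList_inj.mp
  simp [PySem.Str.join, PySem.Chars.join, List.intercalate]

theorem pvJoin_singleton (sep w : String) : PySem.Str.join sep [w] = w := by
  apply String.toList_inj.mp
  simp [PySem.Str.join, PySem.Chars.join, List.intercalate]

theorem pvJoinT_eq_join (ws : List String) (h : ws ≠ []) :
    pvJoinT ws = PySem.Str.join " " ws ++ " " := by
  induction ws with
  | nil => simp at h
  | cons w ws ih =>
      cases ws with
      | nil => simp [pvJoinT, pvJoin_singleton]
      | cons v vs =>
          rw [pvJoinT, ih (by simp), pvJoin_cons_cons]
          simp [String.append_assoc]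

theorem pvJoin_nil (sep : String) : PySem.Str.join sep [] = "" := by
  apply String.toList_inj.mp
  simp [PySem.Str.join, PySem.Chars.join, List.intercalate]

theorem pvStrip_joinT (ws : List String) :
    PySem.Str.strip (pvJoinT ws) = PySem.Str.strip (PySem.Str.join " " ws) := by
  cases hw : ws with
  | nil => simp [pvJoinT, pvJoin_nil]
  | cons w t => rw [pvJoinT_eq_join _ (by simp), pvStrip_space]

-- ===== VERDICT (by name: the statement is the Claim_ definition above) =====
theorem create_srt_fragment_py_spec : Claim_equal_create_srt_fragment_py := by
  intro index start duration text _
  unfold Spec_create_srt_fragment_py create_srt_fragment_py create_srt_fragment_py_alt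
  simp only []
  generalize (PySem.Str.split? text " ").getD [] = ws
  rw [pvStepA_one]
  cases hf : pvFindSplit 0 ws with
  | none =>
      simp [List.foldl, pvJoin_singleton, pvStrip_joinT, String.append_assoc]
  | some i =>
      simp [List.foldl, pvJoin_singleton, pvJoin_cons_cons, pvStrip_joinT, String.append_assoc]
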